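-- pv_equiv track=rewrite | github.com/nick-kraus/riceprobe | scripts/mfg/gen_manufacturing_data_hex.py | luhn_mod36_check_gen
-- ===== SOURCE A (Python) =====
-- import math
--
-- def luhn_mod36_check_gen(string):
--     factor = 2
--     sum = 0
--     n = 36
--
--     char_to_code = lambda c : \
--         ord(c) - ord('0') if c >= '0' and c <= '9' else \
--             ord(c) - ord('A') + 10 if c >= 'A' and c <= 'Z' else None
--     code_to_char = lambda c : \
--         chr(ord('0') + c) if c >= 0 and c <= 9 else \
--             chr(ord('A') + c - 10) if c >= 10 and c <= 35 else None
--
--     for i in range(len(string) - 1, -1, -1):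
--         code = char_to_code(string[i])
--         addend = factor * code
--         factor = 1 if factor == 2 else 2
--         addend = math.floor(addend / n) + (addend % n)
--         sum += addend
--
--     remainder = sum % n
--     return code_to_char((n - remainder) % n)
-- ===== SOURCE B (Python) =====
-- def luhn_mod36_check_gen(string):
--     ALPHABET = "0123456789ABCDEFGHIJKLMNOPQRSTUVWXYZ"
--     code = {c: i for i, c in enumerate(ALPHABET)}
--
--     def pair_sum(rev):
--         # consumes the reversed string two characters at a time:
--         # rev[0] is a doubled position, rev[1] (if present) an undoubled one.
--         if not rev:
--             return 0
--         d = code[rev[0]]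
--         s = code[rev[1]] if len(rev) >= 2 else 0
--         return (2 * d - 35 if d >= 18 else 2 * d) + s + pair_sum(rev[2:])
--
--     total = pair_sum(string[::-1])
--     return ALPHABET[-total % 36]
-- ===== Notes on version B (the rewrite author's own statement) =====
-- stated objective: alternative
-- what changed: Replaces A's backward index loop with toggling factor state and per-character floor/mod reduction by a recursion that consumes the reversed string two characters at a time, maps characters through an alphabet lookup table instead of ord arithmetic, folds the doubled-digit reduction into the closed form 2d-35 (for d>=18), and reads the check character directly from the alphabet at index -total % 36.
import Mathlib
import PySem

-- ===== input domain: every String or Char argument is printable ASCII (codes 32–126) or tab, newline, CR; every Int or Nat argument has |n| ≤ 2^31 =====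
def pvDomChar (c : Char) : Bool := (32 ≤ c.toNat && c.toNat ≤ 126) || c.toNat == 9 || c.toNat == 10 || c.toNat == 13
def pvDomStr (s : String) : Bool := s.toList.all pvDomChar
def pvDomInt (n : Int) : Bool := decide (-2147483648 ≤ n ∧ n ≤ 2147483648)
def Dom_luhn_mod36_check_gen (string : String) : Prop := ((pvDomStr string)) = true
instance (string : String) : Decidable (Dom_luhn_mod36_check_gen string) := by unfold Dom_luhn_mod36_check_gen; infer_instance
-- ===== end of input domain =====

-- B replaces A's backward loop with a toggling factor and per-character floor/mod reduction
-- by a two-characters-at-a-time recursion over the reversed string, a lookup table for the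
-- codes, the closed form 2d-35 for doubled digits, and direct alphabet indexing (alternative).

-- ===== PORT A =====

-- char_to_code lambda of A (None = the value that makes Python raise on the multiply).
def pvCharToCode (c : Char) : Option Int :=
  if '0' ≤ c ∧ c ≤ '9' then some ((c.toNat : Int) - 48)
  else if 'A' ≤ c ∧ c ≤ 'Z' then some ((c.toNat : Int) - 65 + 10)
  else none

-- code_to_char lambda of A.
def pvCodeToChar (c : Int) : Option Char :=
  if 0 ≤ c ∧ c ≤ 9 then some (Char.ofNat (48 + c.toNat))
  else if 10 ≤ c ∧ c ≤ 35 then some (Char.ofNat (65 + (c - 10).toNat))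
  else none

-- A's for-loop over i = len-1 .. 0, i.e. over the reversed character list;
-- state = (factor, sum); none = the TypeError on an invalid character.
def pvALoop : List Char → Int → Int → Option Int
  | [], _, s => some s
  | c :: rest, factor, s =>
    match pvCharToCode c with
    | none => none
    | some code =>
      let addend := factor * code
      let factor' : Int := if factor = 2 then 1 else 2
      let addend2 := PySem.Int.floordiv addend 36 + PySem.Int.mod addend 36
      pvALoop rest factor' (s + addend2)

def luhn_mod36_check_gen (string : String) : Option String :=
  match pvALoop string.toList.reverse 2 0 with
  | none => none
  | some sum =>
    let remainder := PySem.Int.mod sum 36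
    (pvCodeToChar (PySem.Int.mod (36 - remainder) 36)).map (fun c => String.mk [c])

-- ===== PORT B =====

def pvAlphabet : List Char := "0123456789ABCDEFGHIJKLMNOPQRSTUVWXYZ".toList

-- code = {c: i for i, c in enumerate(ALPHABET)}
def pvCodeDict : PySem.Dict Char Int :=
  (PySem.List.enumerate pvAlphabet).foldl (fun d ic => d.insert ic.2 ic.1) PySem.Dict.empty

-- pair_sum of B; none = the KeyError on a character outside the alphabet
-- (the two lookups, the len >= 2 default 0 and the recursion on rev[2:] in Python's order).
def pvPairSum : List Char → Option Int
  | [] => some 0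
  | [c] => (pvCodeDict.get? c).map (fun d => (if 18 ≤ d then 2 * d - 35 else 2 * d) + 0 + 0)
  | c :: c2 :: rest =>
    (pvCodeDict.get? c).bind fun d =>
      (pvCodeDict.get? c2).bind fun s =>
        (pvPairSum rest).map fun t => (if 18 ≤ d then 2 * d - 35 else 2 * d) + s + t

-- string[::-1] is the reversed character list (PySem.List.slice?_none_none_neg_one).
def luhn_mod36_check_gen_alt (string : String) : Option String :=
  match pvPairSum string.toList.reverse with
  | none => none
  | some total =>
    (PySem.List.pyGet? pvAlphabet (PySem.Int.mod (-total) 36)).map (fun c => String.mk [c])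

-- ===== PRECONDITION & SPEC =====
-- Pre_ excludes exactly the strings with a character outside 0-9A-Z, on which A raises TypeError.
def Pre_luhn_mod36_check_gen (string : String) : Prop :=
  (string.toList.all (fun c =>
    (decide (48 ≤ c.toNat) && decide (c.toNat ≤ 57)) ||
    (decide (65 ≤ c.toNat) && decide (c.toNat ≤ 90)))) = true
instance (string : String) : Decidable (Pre_luhn_mod36_check_gen string) := by
  unfold Pre_luhn_mod36_check_gen; infer_instance
def pvWitness_luhn_mod36_check_gen : String := "7"

def Spec_luhn_mod36_check_gen (string : String) (out : Option String) : Prop := out = luhn_mod36_check_gen_alt string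
instance (string : String) (out : Option String) : Decidable (Spec_luhn_mod36_check_gen string out) := by unfold Spec_luhn_mod36_check_gen; infer_instance

-- ===== CLAIM (what is proved, stated in full; the proofs are below) =====
def Claim_equal_luhn_mod36_check_gen : Prop := ∀ (string : String), Dom_luhn_mod36_check_gen string → Pre_luhn_mod36_check_gen string → Spec_luhn_mod36_check_gen string (luhn_mod36_check_gen string)

-- ===== LEMMAS AND PROOFS =====

-- code of a valid character, as a total function
def pvCode0 (c : Char) : Int := (pvCharToCode c).getD 0

-- A's per-addend reduction
def pvRed (a : Int) : Int := PySem.Int.floordiv a 36 + PySem.Int.mod a 36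

-- pure version of A's loop sum (no Option), factor state threaded
def pvSumA : Int → List Char → Int
  | _, [] => 0
  | f, c :: rest => pvRed (f * pvCode0 c) + pvSumA (if f = 2 then 1 else 2) rest

-- pure version of B's pair_sum
def pvSumP : List Char → Int
  | [] => 0
  | [c] => (if 18 ≤ pvCode0 c then 2 * pvCode0 c - 35 else 2 * pvCode0 c) + 0 + 0
  | c :: c2 :: rest =>
      (if 18 ≤ pvCode0 c then 2 * pvCode0 c - 35 else 2 * pvCode0 c) + pvCode0 c2 + pvSumP rest

def pvValid (l : List Char) : Prop :=
  ∀ c ∈ l, ('0' ≤ c ∧ c ≤ '9') ∨ ('A' ≤ c ∧ c ≤ 'Z')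

theorem pvCharLe (a b : Char) : a ≤ b ↔ a.toNat ≤ b.toNat := by
  constructor
  · intro h; exact UInt32.le_iff_toNat_le.mp h
  · intro h; exact UInt32.le_iff_toNat_le.mpr h

theorem pvPre_valid {s : String} (h : Pre_luhn_mod36_check_gen s) : pvValid s.toList := by
  intro c hc
  have hb := List.all_eq_true.mp h c hc
  simp only [Bool.or_eq_true, Bool.and_eq_true, decide_eq_true_eq] at hb
  rcases hb with ⟨h1, h2⟩ | ⟨h1, h2⟩
  · exact Or.inl ⟨(pvCharLe _ _).mpr (show (48:Nat) ≤ c.toNat by omega),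
      (pvCharLe _ _).mpr (show c.toNat ≤ 57 by omega)⟩
  · exact Or.inr ⟨(pvCharLe _ _).mpr (show (65:Nat) ≤ c.toNat by omega),
      (pvCharLe _ _).mpr (show c.toNat ≤ 90 by omega)⟩

theorem pvCharToCode_valid {c : Char} (h : ('0' ≤ c ∧ c ≤ '9') ∨ ('A' ≤ c ∧ c ≤ 'Z')) :
    pvCharToCode c = some (pvCode0 c) := by
  unfold pvCharToCode pvCode0 pvCharToCode
  rcases h with h | h
  · simp [h]
  · have h9 : ¬ ('0' ≤ c ∧ c ≤ '9') := by
      rintro ⟨_, hc9⟩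
      exact absurd (le_trans h.1 hc9) (by decide)
    simp [h9, h]

theorem pvCode0_bounds {c : Char} (h : ('0' ≤ c ∧ c ≤ '9') ∨ ('A' ≤ c ∧ c ≤ 'Z')) :
    0 ≤ pvCode0 c ∧ pvCode0 c ≤ 35 := by
  have h48 := (pvCharLe '0' c)
  have h57 := (pvCharLe c '9')
  have h65 := (pvCharLe 'A' c)
  have h90 := (pvCharLe c 'Z')
  unfold pvCode0 pvCharToCode
  rcases h with ⟨ha, hb⟩ | ⟨ha, hb⟩
  · have ha' : (48:Nat) ≤ c.toNat := h48.mp ha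
    have hb' : c.toNat ≤ 57 := h57.mp hb
    simp only [if_pos (And.intro ha hb), Option.getD_some]
    constructor <;> omega
  · have ha' : (65:Nat) ≤ c.toNat := h65.mp ha
    have hb' : c.toNat ≤ 90 := h90.mp hb
    have h9 : ¬ ('0' ≤ c ∧ c ≤ '9') := by
      rintro ⟨_, hc9⟩
      exact absurd (le_trans ha hc9) (by decide)
    simp only [if_neg h9, if_pos (And.intro ha hb), Option.getD_some]
    constructor <;> omega

-- the lookup table agrees with A's char_to_code, checked over all ASCII codes < 128
set_option maxRecDepth 8192 in
theorem pvDict_table :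
    ((List.range 128).all (fun n =>
      pvCodeDict.get? (Char.ofNat n) == pvCharToCode (Char.ofNat n))) = true := by decide

theorem pvDict_get_valid {c : Char} (h : ('0' ≤ c ∧ c ≤ '9') ∨ ('A' ≤ c ∧ c ≤ 'Z')) :
    pvCodeDict.get? c = some (pvCode0 c) := by
  have hlt : c.toNat < 128 := by
    rcases h with ⟨_, hb⟩ | ⟨_, hb⟩
    · have h' : c.toNat ≤ 57 := (pvCharLe c '9').mp hb
      omega
    · have h' : c.toNat ≤ 90 := (pvCharLe c 'Z').mp hb
      omega
  have hc : Char.ofNat c.toNat = c := Char.ofNat_toNat c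
  have := List.all_eq_true.mp pvDict_table c.toNat (List.mem_range.mpr hlt)
  rw [hc] at this
  rw [eq_of_beq this, pvCharToCode_valid h]

theorem pvPairSum_eq_sumP {l : List Char} (hv : pvValid l) :
    pvPairSum l = some (pvSumP l) := by
  induction l using pvSumP.induct with
  | case1 => rfl
  | case2 c =>
    have hc := hv c (by simp)
    unfold pvPairSum pvSumP
    rw [pvDict_get_valid hc]
    rfl
  | case3 c c2 rest ih =>
    have hc := hv c (by simp)
    have hc2 := hv c2 (by simp)
    have hrest : pvValid rest := fun x hx => hv x (by simp [hx])
    unfold pvPairSum pvSumP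
    rw [pvDict_get_valid hc, pvDict_get_valid hc2, ih hrest]
    rfl

theorem pvALoop_eq_sumA {l : List Char} (hv : pvValid l) :
    ∀ f s, pvALoop l f s = some (s + pvSumA f l) := by
  induction l with
  | nil => intro f s; simp [pvALoop, pvSumA]
  | cons c rest ih =>
    intro f s
    have hc := hv c (by simp)
    have hrest : pvValid rest := fun x hx => hv x (by simp [hx])
    simp only [pvALoop, pvCharToCode_valid hc, pvSumA, ih hrest]
    congr 1
    simp only [pvRed]
    ring

theorem pvRed_double {d : Int} (h0 : 0 ≤ d) (h35 : d ≤ 35) :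
    pvRed (2 * d) = if 18 ≤ d then 2 * d - 35 else 2 * d := by
  unfold pvRed
  rw [PySem.Int.floordiv_eq_ediv_of_pos (by norm_num),
      PySem.Int.mod_eq_emod_of_pos (by norm_num)]
  split_ifs with h <;> omega

theorem pvRed_single {d : Int} (h0 : 0 ≤ d) (h35 : d ≤ 35) : pvRed (1 * d) = d := by
  unfold pvRed
  rw [PySem.Int.floordiv_eq_ediv_of_pos (by norm_num),
      PySem.Int.mod_eq_emod_of_pos (by norm_num)]
  omega

theorem pvSumA_eq_sumP {l : List Char} (hv : pvValid l) : pvSumA 2 l = pvSumP l := by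
  induction l using pvSumP.induct with
  | case1 => rfl
  | case2 c =>
    have hc := hv c (by simp)
    obtain ⟨h0, h35⟩ := pvCode0_bounds hc
    show pvRed (2 * pvCode0 c) + 0
        = (if 18 ≤ pvCode0 c then 2 * pvCode0 c - 35 else 2 * pvCode0 c) + 0 + 0
    rw [pvRed_double h0 h35]
    omega
  | case3 c c2 rest ih =>
    have hc := hv c (by simp)
    have hc2 := hv c2 (by simp)
    have hrest : pvValid rest := fun x hx => hv x (by simp [hx])
    obtain ⟨h0, h35⟩ := pvCode0_bounds hc
    obtain ⟨h0', h35'⟩ := pvCode0_bounds hc2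
    show pvRed (2 * pvCode0 c) + (pvRed (1 * pvCode0 c2) + pvSumA 2 rest) = _
    rw [pvRed_double h0 h35, pvRed_single h0' h35', ih hrest]
    show _ = _ + pvCode0 c2 + pvSumP rest
    ring

-- the two check-digit indices agree
theorem pvIdx_eq (T : Int) :
    PySem.Int.mod (36 - PySem.Int.mod T 36) 36 = PySem.Int.mod (-T) 36 := by
  rw [PySem.Int.mod_eq_emod_of_pos (a := T) (by norm_num),
      PySem.Int.mod_eq_emod_of_pos (a := 36 - T % 36) (by norm_num),
      PySem.Int.mod_eq_emod_of_pos (a := -T) (by norm_num)]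
  omega

-- A's code_to_char of k agrees with indexing the alphabet, for all k in [0, 35]
theorem pvCodeToChar_table :
    ((List.range 36).all (fun k =>
      pvCodeToChar (k : Int) == pvAlphabet[k]?)) = true := by decide

theorem pvCodeToChar_eq_get {k : Int} (h0 : 0 ≤ k) (h35 : k ≤ 35) :
    pvCodeToChar k = PySem.List.pyGet? pvAlphabet k := by
  have hk : k = ((k.toNat : Nat) : Int) := by omega
  have hlt : k.toNat < 36 := by omega
  have htab := List.all_eq_true.mp pvCodeToChar_table k.toNat (List.mem_range.mpr hlt)
  have htab' := eq_of_beq htab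
  rw [hk, PySem.List.pyGet?_natCast]
  exact htab'

-- ===== VERDICT (by name: the statement is the Claim_ definition above) =====
theorem luhn_mod36_check_gen_spec : Claim_equal_luhn_mod36_check_gen := by
  intro s _ hpre
  unfold Spec_luhn_mod36_check_gen luhn_mod36_check_gen luhn_mod36_check_gen_alt
  have hv : pvValid s.toList := pvPre_valid hpre
  have hvr : pvValid s.toList.reverse := fun c hc => hv c (List.mem_reverse.mp hc)
  rw [pvALoop_eq_sumA hvr 2 0, pvPairSum_eq_sumP hvr, pvSumA_eq_sumP hvr]
  set T := pvSumP s.toList.reverse with hT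
  simp only [zero_add]
  rw [pvIdx_eq T]
  have hb0 : 0 ≤ PySem.Int.mod (-T) 36 := PySem.Int.mod_nonneg _ (by norm_num)
  have hb35 : PySem.Int.mod (-T) 36 ≤ 35 := by
    have := PySem.Int.mod_lt (-T) (b := 36) (by norm_num); omega
  rw [pvCodeToChar_eq_get hb0 hb35]
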